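-- pv_equiv track=rewrite | github.com/yptb05/tb05 | app_儲存狀態顯示完整版.py | segments_to_tagged
-- ===== SOURCE A (Python) =====
-- COLOR_CANONICAL_TAG = {
--     "red": "紅",
--     "blue": "藍",
--     "green": "綠",
--     "orange": "橘",
--     "purple": "紫",
--     "gray": "灰",
--     "black": "黑",
-- }
--
-- def segments_to_tagged(segments) -> str:
--     parts = []
--     current = None
--     for txt, color in segments:
--         if color != current:
--             if current is not None:
--                 parts.append("[/]")
--             if color is not None:
--                 parts.append(f"[{COLOR_CANONICAL_TAG.get(color, color)}]")
--             current = color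
--         parts.append(txt)
--     if current is not None:
--         parts.append("[/]")
--     return "".join(parts)
-- ===== SOURCE B (Python) =====
-- COLOR_CANONICAL_TAG = {
--     "red": "紅",
--     "blue": "藍",
--     "green": "綠",
--     "orange": "橘",
--     "purple": "紫",
--     "gray": "灰",
--     "black": "黑",
-- }
--
-- def segments_to_tagged(segments) -> str:
--     segs = list(segments)
--     colors = [c for _, c in segs]
--     parts = []
--     for (txt, c), prev, nxt in zip(segs, [None] + colors[:-1], colors[1:] + [None]):
--         piece = txt
--         if c is not None:
--             if prev != c:
--                 piece = f"[{COLOR_CANONICAL_TAG.get(c, c)}]" + piece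
--             if nxt != c:
--                 piece = piece + "[/]"
--         parts.append(piece)
--     return "".join(parts)
-- ===== Notes on version B (the rewrite author's own statement) =====
-- stated objective: alternative
-- what changed: Replaces A's running current-color state machine (close/open tags emitted at transitions plus a trailing fix-up) with a stateless per-segment renderer: each segment is zipped with its neighbours' colors and locally decides its own open tag (prev != c) and close tag (next != c), then all pieces are joined.
import Mathlib
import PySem

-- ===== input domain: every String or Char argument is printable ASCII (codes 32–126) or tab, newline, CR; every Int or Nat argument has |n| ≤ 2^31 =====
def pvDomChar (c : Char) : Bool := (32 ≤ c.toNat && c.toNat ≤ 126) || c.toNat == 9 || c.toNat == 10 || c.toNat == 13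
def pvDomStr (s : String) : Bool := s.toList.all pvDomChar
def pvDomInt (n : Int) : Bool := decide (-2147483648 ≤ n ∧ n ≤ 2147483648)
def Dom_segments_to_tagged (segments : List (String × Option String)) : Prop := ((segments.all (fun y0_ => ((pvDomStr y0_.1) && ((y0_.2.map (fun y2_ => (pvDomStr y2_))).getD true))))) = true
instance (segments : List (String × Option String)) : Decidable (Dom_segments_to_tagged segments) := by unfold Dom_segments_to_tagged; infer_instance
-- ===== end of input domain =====

-- B replaces A's running current-color state machine with a stateless per-segment renderer:
-- each segment, zipped with its neighbours' colors, locally decides its own open/close tags; objective: alternative.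

-- ===== PORT A =====
def pvTagDict : PySem.Dict String String := PySem.Dict.ofList
  [("red", "紅"), ("blue", "藍"), ("green", "綠"), ("orange", "橘"),
   ("purple", "紫"), ("gray", "灰"), ("black", "黑")]

-- the for-loop of A: state = (parts, current)
def pvAGo : List (String × Option String) → List String → Option String → List String
  | [], parts, current => if current ≠ none then parts ++ ["[/]"] else parts
  | (txt, color) :: rest, parts, current =>
      if color ≠ current then
        pvAGo rest
          (((if current ≠ none then parts ++ ["[/]"] else parts) ++
            (match color with
             | some c => ["[" ++ pvTagDict.getD c c ++ "]"]
             | none => [])) ++ [txt]) color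
      else
        pvAGo rest (parts ++ [txt]) color

def segments_to_tagged (segments : List (String × Option String)) : String :=
  PySem.Str.join "" (pvAGo segments [] none)

-- ===== PORT B =====
-- one loop-body of Source B: the piece for segment (txt, c) given the neighbouring colors (prev, nxt)
def pvPiece (x : (String × Option String) × (Option String × Option String)) : String :=
  match x with
  | ((txt, c), (prev, nxt)) =>
    match c with
    | none => txt
    | some c0 =>
        let p1 := if prev ≠ some c0 then ("[" ++ pvTagDict.getD c0 c0 ++ "]") ++ txt else txt
        if nxt ≠ some c0 then p1 ++ "[/]" else p1

def segments_to_tagged_alt (segments : List (String × Option String)) : String :=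
  let colors := segments.map (·.2)
  let prevs : List (Option String) := none :: colors.dropLast
  let nexts : List (Option String) := colors.drop 1 ++ [none]
  PySem.Str.join "" ((segments.zip (prevs.zip nexts)).map pvPiece)

-- ===== PRECONDITION & SPEC =====
def Spec_segments_to_tagged (segments : List (String × Option String)) (out : String) : Prop := out = segments_to_tagged_alt segments
instance (segments : List (String × Option String)) (out : String) : Decidable (Spec_segments_to_tagged segments out) := by unfold Spec_segments_to_tagged; infer_instance

-- ===== CLAIM (what is proved, stated in full; the proofs are below) =====
def Claim_equal_segments_to_tagged : Prop := ∀ (segments : List (String × Option String)), Dom_segments_to_tagged segments → Spec_segments_to_tagged segments (segments_to_tagged segments)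

-- ===== LEMMAS AND PROOFS =====

-- head color of the remaining segments (none when empty)
def pvHC : List (String × Option String) → Option String
  | [] => none
  | (_, c) :: _ => c

-- B's pieces written as a recursion carrying the previous color (proof-side view of the zip)
def pvBGo : List (String × Option String) → Option String → List String
  | [], _ => []
  | (t, c) :: rest, prev => pvPiece ((t, c), (prev, pvHC rest)) :: pvBGo rest c

-- flatten the parts list to the characters of "".join(parts)
def pvF (xs : List String) : List Char := (xs.map String.toList).flatten

theorem pvJoin_empty (xss : List (List Char)) : PySem.Chars.join [] xss = xss.flatten := by
  induction xss with
  | nil => simp [PySem.Chars.join, List.intercalate]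
  | cons h t ih =>
      cases t with
      | nil => simp [PySem.Chars.join, List.intercalate]
      | cons h2 t2 =>
          simp only [PySem.Chars.join, List.intercalate] at ih ⊢
          simp [List.intersperse, ih]

theorem pvJoin_eq_pvF (xs : List String) :
    PySem.Str.join "" xs = String.ofList (pvF xs) := by
  simp [PySem.Str.join, pvJoin_empty, pvF]

-- the zip-map of the port equals the recursion pvBGo
theorem pvZip_eq_pvBGo (segs : List (String × Option String)) (prev : Option String) :
    (segs.zip ((prev :: (segs.map (·.2)).dropLast).zip ((segs.map (·.2)).drop 1 ++ [none]))).map pvPiece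
      = pvBGo segs prev := by
  induction segs generalizing prev with
  | nil => simp [pvBGo]
  | cons h rest ih =>
      obtain ⟨t, c⟩ := h
      cases rest with
      | nil => simp [pvBGo, pvHC]
      | cons h2 r2 =>
          obtain ⟨t2, c2⟩ := h2
          simpa [pvBGo, pvHC] using ih c

theorem pvAGo_nil (parts : List String) (cur : Option String) :
    pvAGo [] parts cur = parts ++ (if cur ≠ none then ["[/]"] else []) := by
  cases cur <;> simp [pvAGo]

theorem pvAGo_acc (segs : List (String × Option String)) (parts : List String) (cur : Option String) :
    pvAGo segs parts cur = parts ++ pvAGo segs [] cur := by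
  induction segs generalizing parts cur with
  | nil => rw [pvAGo_nil, pvAGo_nil]; simp
  | cons h t ih =>
      obtain ⟨txt, color⟩ := h
      simp only [pvAGo]
      split_ifs with h1 h2
      · rw [ih, ih (_ ++ [txt])]; cases color <;> simp
      · rw [ih, ih (_ ++ [txt])]; cases color <;> simp
      · rw [ih, ih ([] ++ [txt])]; simp

theorem pvF_cons (s : String) (l : List String) : pvF (s :: l) = s.toList ++ pvF l := by
  simp [pvF]

theorem pvPiece_toList (t : String) (c prev nxt : Option String) :
    (pvPiece ((t, c), (prev, nxt))).toList =
      (match c with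
       | none => t.toList
       | some c0 =>
           (if prev ≠ some c0 then ("[" ++ pvTagDict.getD c0 c0 ++ "]").toList else []) ++
             t.toList ++ (if nxt ≠ some c0 then ['[', '/', ']'] else [])) := by
  cases c with
  | none => rfl
  | some c0 =>
      by_cases h1 : prev = some c0 <;> by_cases h2 : nxt = some c0 <;>
        simp [pvPiece, h1, h2]

-- main invariant: A's remaining output = (pending close of prev, emitted iff the next color differs)
-- followed by B's remaining pieces
theorem pvAGo_eq_pvBGo (segs : List (String × Option String)) (prev : Option String) :
    pvF (pvAGo segs [] prev)
      = (if prev ≠ none ∧ pvHC segs ≠ prev then ['[', '/', ']'] else []) ++ pvF (pvBGo segs prev) := by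
  induction segs generalizing prev with
  | nil =>
      rw [pvAGo_nil]
      cases prev <;> simp [pvBGo, pvHC, pvF]
  | cons h rest ih =>
      obtain ⟨t, c⟩ := h
      simp only [pvAGo]
      by_cases hc : c = prev
      · subst hc
        rw [if_neg (by simp), pvAGo_acc]
        have h1 : pvF ([] ++ [t] ++ pvAGo rest [] c) = t.toList ++ pvF (pvAGo rest [] c) := by
          simp [pvF]
        rw [h1, ih, pvBGo, pvF_cons, pvPiece_toList]
        cases c with
        | none => simp
        | some c0 => by_cases hn : pvHC rest = some c0 <;> simp [hn, pvHC]
      · rw [if_pos (by simpa using hc), pvAGo_acc]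
        have h1 : ∀ pre : List String,
            pvF (pre ++ [t] ++ pvAGo rest [] c) = pvF pre ++ t.toList ++ pvF (pvAGo rest [] c) := by
          intro pre; simp [pvF]
        rw [h1, ih, pvBGo, pvF_cons, pvPiece_toList]
        have hhc : pvHC ((t, c) :: rest) = c := rfl
        cases c with
        | none =>
            cases prev with
            | none => exact absurd rfl hc
            | some p0 =>
                simp [pvF, pvHC]
        | some c0 =>
            cases prev with
            | none =>
                simp [pvF, pvHC]
            | some p0 =>
                have hps : p0 ≠ c0 := fun h => hc (by simp [h])
                simp [pvF, pvHC, hps, show ¬ c0 = p0 from fun h => hps h.symm]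

-- ===== VERDICT (by name: the statement is the Claim_ definition above) =====
theorem segments_to_tagged_spec : Claim_equal_segments_to_tagged := by
  intro segments _
  unfold Spec_segments_to_tagged segments_to_tagged segments_to_tagged_alt
  rw [pvJoin_eq_pvF, pvJoin_eq_pvF, pvZip_eq_pvBGo, pvAGo_eq_pvBGo]
  simp
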